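-- pv_equiv track=rewrite | github.com/jpaubry/advent-of-code-2025 | day10/puzzle2_bak2.py | get_button_affecting_one_counter
-- ===== SOURCE A (Python) =====
-- def get_button_affecting_one_counter(my_buttons):
--     my_counters_affectation = {}
--
--     for ind in range(0, len(my_buttons[0])):
--         my_counters_affectation[ind] = []
--
--     for button in my_buttons:
--         for ind in range(0, len(button)):
--             if button[ind] == '1':
--                 my_counters_affectation[ind].append(button)
--     for counter_index in my_counters_affectation.keys():
--         if len(my_counters_affectation[counter_index]) == 1:
--             return counter_index, my_counters_affectation[counter_index][0]
--     return -1, None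
-- ===== SOURCE B (Python) =====
-- def get_button_affecting_one_counter(my_buttons):
--     width = len(my_buttons[0])
--     for i in range(width):
--         count = 0
--         first = None
--         for b in my_buttons:
--             if i < len(b) and b[i] == '1':
--                 count += 1
--                 if first is None:
--                     first = b
--         if count == 1:
--             return i, first
--     return -1, None
-- ===== Notes on version B (the rewrite author's own statement) =====
-- stated objective: simpler
-- what changed: Replaced the dict-of-lists build (full affectation table, then a key scan) by a single short-circuiting counter-outer/button-inner pass that keeps only a count and the first matching button per counter index.
import Mathlib
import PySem

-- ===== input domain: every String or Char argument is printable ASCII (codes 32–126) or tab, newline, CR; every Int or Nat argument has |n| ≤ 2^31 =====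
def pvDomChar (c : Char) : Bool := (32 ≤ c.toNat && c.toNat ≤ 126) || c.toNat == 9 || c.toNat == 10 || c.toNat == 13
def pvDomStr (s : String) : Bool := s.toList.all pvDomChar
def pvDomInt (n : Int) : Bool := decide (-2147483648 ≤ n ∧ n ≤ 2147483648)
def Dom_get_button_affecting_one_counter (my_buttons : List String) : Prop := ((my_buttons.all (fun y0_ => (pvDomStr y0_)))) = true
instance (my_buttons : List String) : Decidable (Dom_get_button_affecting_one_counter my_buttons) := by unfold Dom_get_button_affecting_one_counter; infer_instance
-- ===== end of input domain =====

-- B replaces A's dict-of-lists affectation table + key scan by one fused, short-circuiting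
-- counter-outer/button-inner pass keeping only a count and the first matching button (objective: simpler).

-- ===== PORT A =====
-- inner 'for ind in range(0, len(button)): if button[ind] == '1': my_counters_affectation[ind].append(button)'
-- (the KeyError Python raises when ind is not a key is excluded by Pre_; there Dict.modify is exact)
def pvAInner (b : String) (d : PySem.Dict Int (List String)) : PySem.Dict Int (List String) :=
  (PySem.List.pyRange 0 (PySem.Str.len b)).foldl
    (fun d ind => if PySem.Str.pyGet? b ind == some '1' then d.modify ind [] (· ++ [b]) else d) d

-- 'for counter_index in my_counters_affectation.keys(): if len(...) == 1: return …'
def pvAScan (d : PySem.Dict Int (List String)) : List Int → Int × Option String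
  | [] => (-1, none)
  | k :: rest =>
      if PySem.List.len (d.getD k []) == 1 then (k, PySem.List.pyGet? (d.getD k []) 0)
      else pvAScan d rest

def get_button_affecting_one_counter (my_buttons : List String) : Int × Option String :=
  let d0 := (PySem.List.pyRange 0 (PySem.Str.len (PySem.List.pyGetD my_buttons 0 ""))).foldl
      (fun d ind => d.insert ind ([] : List String)) PySem.Dict.empty
  let d1 := my_buttons.foldl (fun d b => pvAInner b d) d0
  pvAScan d1 d1.keys

-- ===== PORT B =====
-- inner 'for b in my_buttons: if i < len(b) and b[i] == '1': count += 1; if first is None: first = b'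
def pvBCount (my_buttons : List String) (i : Int) : Int × Option String :=
  my_buttons.foldl (fun p b =>
    if decide (i < PySem.Str.len b) && (PySem.Str.pyGet? b i == some '1') then
      (p.1 + 1, if p.2 = none then some b else p.2)
    else p) (0, none)

-- outer 'for i in range(width): …; if count == 1: return i, first' (rem = width - i counts the
-- remaining indices, making the recursion structural)
def pvBLoop (my_buttons : List String) (i : Nat) : Nat → Int × Option String
  | 0 => (-1, none)
  | rem + 1 =>
      let cf := pvBCount my_buttons (i : Int)
      if cf.1 == 1 then ((i : Int), cf.2) else pvBLoop my_buttons (i + 1) rem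

def get_button_affecting_one_counter_alt (my_buttons : List String) : Int × Option String :=
  pvBLoop my_buttons 0 (PySem.Str.len (PySem.List.pyGetD my_buttons 0 "")).toNat

-- ===== PRECONDITION & SPEC =====
-- Pre_ excludes exactly the inputs where A raises: the empty list (IndexError on my_buttons[0]) and
-- lists where some button has a '1' at a position >= len(my_buttons[0]) (KeyError on the append).
def Pre_get_button_affecting_one_counter (my_buttons : List String) : Prop :=
  my_buttons ≠ [] ∧ ∀ b ∈ my_buttons, '1' ∉ b.toList.drop (my_buttons.headD "").toList.length
instance (my_buttons : List String) : Decidable (Pre_get_button_affecting_one_counter my_buttons) := by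
  unfold Pre_get_button_affecting_one_counter; infer_instance

def pvWitness_get_button_affecting_one_counter : List String := ["10", "01"]

def Spec_get_button_affecting_one_counter (my_buttons : List String) (out : Int × Option String) : Prop :=
  out = get_button_affecting_one_counter_alt my_buttons
instance (my_buttons : List String) (out : Int × Option String) : Decidable (Spec_get_button_affecting_one_counter my_buttons out) := by unfold Spec_get_button_affecting_one_counter; infer_instance

-- ===== CLAIM (what is proved, stated in full; the proofs are below) =====
def Claim_equal_get_button_affecting_one_counter : Prop := ∀ (my_buttons : List String), Dom_get_button_affecting_one_counter my_buttons → Pre_get_button_affecting_one_counter my_buttons → Spec_get_button_affecting_one_counter my_buttons (get_button_affecting_one_counter my_buttons)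


-- ===== LEMMAS AND PROOFS =====

-- the per-counter list A's dict ends up holding at index k
def pvFilt (bs : List String) (k : Nat) : List String :=
  bs.filter (fun b => b.toList[k]? == some '1')

theorem pvRange_getD (b : String) (k : Nat) : ∀ (n : Nat) (d : PySem.Dict Int (List String)),
    ((List.range n).foldl (fun d (j : Nat) => if PySem.Str.pyGet? b (j : Int) == some '1' then d.modify (j : Int) [] (· ++ [b]) else d) d).getD (k : Int) [] =
      d.getD (k : Int) [] ++ (if k < n ∧ b.toList[k]? = some '1' then [b] else []) := by
  intro n
  induction n with
  | zero => intro d; simp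
  | succ m ih =>
    intro d
    rw [List.range_succ, List.foldl_append]
    simp only [List.foldl_cons, List.foldl_nil]
    by_cases hc : PySem.Str.pyGet? b (m : Int) == some '1'
    · rw [if_pos hc]
      rw [PySem.Dict.getD_modify]
      have hm : b.toList[m]? = some '1' := by
        simpa [PySem.Str.pyGet?, PySem.List.pyGet?_natCast] using hc
      by_cases hk : (k : Int) = (m : Int)
      · have : k = m := by exact_mod_cast hk
        subst this
        rw [ih]
        simp [hm]
      · have hkm : k ≠ m := by intro h; exact hk (by exact_mod_cast h)
        rw [if_neg hk, ih]
        have : (k < m + 1 ∧ b.toList[k]? = some '1') ↔ (k < m ∧ b.toList[k]? = some '1') := by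
          constructor
          · rintro ⟨h1, h2⟩; exact ⟨by omega, h2⟩
          · rintro ⟨h1, h2⟩; exact ⟨by omega, h2⟩
        rw [if_congr this rfl rfl]
    · rw [if_neg hc]
      rw [ih]
      have hm : ¬ b.toList[m]? = some '1' := by
        simpa [PySem.Str.pyGet?, PySem.List.pyGet?_natCast] using hc
      have : (k < m + 1 ∧ b.toList[k]? = some '1') ↔ (k < m ∧ b.toList[k]? = some '1') := by
        constructor
        · rintro ⟨h1, h2⟩
          refine ⟨?_, h2⟩
          rcases Nat.lt_succ_iff_lt_or_eq.mp h1 with h | h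
          · exact h
          · subst h; exact absurd h2 hm
        · rintro ⟨h1, h2⟩; exact ⟨by omega, h2⟩
      rw [if_congr this rfl rfl]

-- getD after one button's inner loop
theorem pvAInner_getD (b : String) (d : PySem.Dict Int (List String)) (k : Nat) :
    (pvAInner b d).getD (k : Int) [] =
      d.getD (k : Int) [] ++ (if b.toList[k]? = some '1' then [b] else []) := by
  unfold pvAInner
  rw [PySem.Str.len_eq, PySem.List.pyRange_zero_natCast, List.foldl_map, pvRange_getD]
  congr 1
  have : (k < b.toList.length ∧ b.toList[k]? = some '1') ↔ b.toList[k]? = some '1' := by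
    constructor
    · exact And.right
    · intro h; exact ⟨(List.getElem?_eq_some_iff.mp h).1, h⟩
  rw [if_congr this rfl rfl]

-- getD of the whole double loop
theorem pvAFold_getD (bs : List String) (d : PySem.Dict Int (List String)) (k : Nat) :
    (bs.foldl (fun d b => pvAInner b d) d).getD (k : Int) [] =
      d.getD (k : Int) [] ++ pvFilt bs k := by
  induction bs generalizing d with
  | nil => simp [pvFilt]
  | cons b rest ih =>
    rw [List.foldl_cons, ih, pvAInner_getD]
    simp only [pvFilt, List.filter_cons]
    by_cases h : b.toList[k]? = some '1'
    · simp [h]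
    · simp [h]

-- the initial dict maps everything to []
theorem pvD0_getD (l : List Int) (d : PySem.Dict Int (List String)) (k : Int)
    (h : d.getD k [] = []) :
    (l.foldl (fun d ind => d.insert ind ([] : List String)) d).getD k [] = [] := by
  induction l generalizing d with
  | nil => simpa using h
  | cons a rest ih =>
    rw [List.foldl_cons]
    apply ih
    rw [PySem.Dict.getD_insert]
    split_ifs with h1
    · rfl
    · exact h

-- keys of the initial dict
theorem pvD0_keys (W : Nat) :
    ((PySem.List.pyRange 0 (W : Int)).foldl
      (fun d ind => d.insert ind ([] : List String)) PySem.Dict.empty).keys =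
      PySem.List.pyRange 0 (W : Int) := by
  have h := PySem.Dict.items_foldl_insert_fresh (PySem.List.pyRange 0 (W : Int)) id
      (fun _ => ([] : List String)) PySem.Dict.empty
      (by intro a _; exact PySem.Dict.contains_empty a)
      (by
        rw [PySem.List.pyRange_zero_natCast, List.map_id]
        exact (List.nodup_range).map (fun a b => by exact_mod_cast id))
  simp only [id] at h
  have : (List.foldl (fun d a => d.insert a ([] : List String)) PySem.Dict.empty (PySem.List.pyRange 0 (W : Int))).keys
      = ((PySem.Dict.empty : PySem.Dict Int (List String)).items ++ (PySem.List.pyRange 0 (W : Int)).map (fun a => (a, ([] : List String)))).map Prod.fst := by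
    rw [← h]; rfl
  rw [this]
  simp only [List.map_append, List.map_map]
  rw [show (Prod.fst ∘ fun (a : Int) => (a, ([] : List String))) = id from rfl, List.map_id]
  simp [PySem.Dict.empty]

theorem pv_one_lt {b : String} {W m : Nat} (hb : '1' ∉ b.toList.drop W)
    (hm : b.toList[m]? = some '1') : m < W := by
  by_contra hge
  rw [Nat.not_lt] at hge
  have hd : (b.toList.drop W)[m - W]? = some '1' := by
    rw [List.getElem?_drop]
    rwa [Nat.add_sub_cancel' hge]
  obtain ⟨h1, h2⟩ := List.getElem?_eq_some_iff.mp hd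
  exact hb (h2 ▸ List.getElem_mem h1)

-- the inner loop never touches a key outside 0..W-1 when b has no '1' beyond W
theorem pvAInner_keys (b : String) (W : Nat) (d : PySem.Dict Int (List String))
    (hk : ∀ j : Nat, j < W → (j : Int) ∈ d.keys)
    (hb : '1' ∉ b.toList.drop W) :
    (pvAInner b d).keys = d.keys := by
  unfold pvAInner
  rw [PySem.Str.len_eq, PySem.List.pyRange_zero_natCast, List.foldl_map]
  induction b.toList.length with
  | zero => simp
  | succ m ih =>
    rw [List.range_succ, List.foldl_append]
    simp only [List.foldl_cons, List.foldl_nil]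
    by_cases hc : PySem.Str.pyGet? b (m : Int) == some '1'
    · rw [if_pos hc]
      have hm : b.toList[m]? = some '1' := by
        simpa [PySem.Str.pyGet?, PySem.List.pyGet?_natCast] using hc
      have hmem : (m : Int) ∈ (List.foldl (fun d (j : Nat) => if PySem.Str.pyGet? b (j : Int) == some '1' then d.modify (j : Int) [] (· ++ [b]) else d) d (List.range m)).keys := by
        rw [ih]
        exact hk m (pv_one_lt hb hm)
      rw [PySem.Dict.keys_modify, PySem.Dict.keys_insert_of_contains, ih]
      exact (PySem.Dict.contains_iff_mem_keys _ _).mpr hmem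
    · rw [if_neg hc]
      exact ih

-- keys are preserved by the double loop when every '1' sits below the width
theorem pvAFold_keys (bs : List String) (W : Nat) (d : PySem.Dict Int (List String))
    (hk : ∀ j : Nat, j < W → (j : Int) ∈ d.keys)
    (hpre : ∀ b ∈ bs, '1' ∉ b.toList.drop W) :
    (bs.foldl (fun d b => pvAInner b d) d).keys = d.keys := by
  induction bs generalizing d with
  | nil => rfl
  | cons b rest ih =>
    rw [List.foldl_cons]
    have hkeys := pvAInner_keys b W d hk (hpre b (by simp))
    rw [ih (pvAInner b d) (fun j hj => hkeys ▸ hk j hj) (fun x hx => hpre x (by simp [hx])), hkeys]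

-- B's guard equals A's membership test (a '1' at k implies k is in range)
theorem pvB_guard (b : String) (k : Nat) :
    (decide ((k : Int) < PySem.Str.len b) && (PySem.Str.pyGet? b (k : Int) == some '1'))
      = (b.toList[k]? == some '1') := by
  rw [PySem.Str.len_eq]
  have h : PySem.Str.pyGet? b (k : Int) = b.toList[k]? := by
    simp [PySem.Str.pyGet?, PySem.List.pyGet?_natCast]
  rw [h]
  by_cases hm : b.toList[k]? = some '1'
  · have hlt : k < b.toList.length := (List.getElem?_eq_some_iff.mp hm).1
    have hlt' : k < b.length := by rwa [String.length_toList] at hlt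
    simp [hlt']
  · simp [hm]

theorem pvBCount_aux (k : Nat) (bs : List String) : ∀ (c : Int) (f : Option String),
    bs.foldl (fun p b =>
      if decide ((k : Int) < PySem.Str.len b) && (PySem.Str.pyGet? b (k : Int) == some '1') then
        (p.1 + 1, if p.2 = none then some b else p.2)
      else p) (c, f)
    = (c + ((pvFilt bs k).length : Int),
       match f with | none => (pvFilt bs k).head? | some x => some x) := by
  induction bs with
  | nil => intro c f; cases f <;> simp [pvFilt]
  | cons b rest ih =>
    intro c f
    rw [List.foldl_cons, pvB_guard]
    by_cases hm : b.toList[k]? = some '1'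
    · rw [if_pos (by simp [hm])]
      cases f with
      | none =>
        simp only [ih]
        simp [pvFilt, hm]
        omega
      | some x =>
        simp only [ih]
        simp [pvFilt, hm]
        omega
    · rw [if_neg (by simp [hm])]
      rw [ih]
      simp [pvFilt, hm]

-- B's inner fold computes (count, first) of the filtered list
theorem pvBCount_eq (bs : List String) (k : Nat) :
    pvBCount bs (k : Int) = (((pvFilt bs k).length : Int), (pvFilt bs k).head?) := by
  unfold pvBCount
  rw [pvBCount_aux]
  simp

-- the two scans agree
theorem pvScan_eq (bs : List String) (W : Nat) (d : PySem.Dict Int (List String))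
    (hd : ∀ k : Nat, d.getD (k : Int) [] = pvFilt bs k) :
    ∀ (rem i : Nat), W = i + rem →
    pvAScan d (PySem.List.pyRange (i : Int) (W : Int)) = pvBLoop bs i rem := by
  intro rem
  induction rem with
  | zero =>
    intro i hi
    rw [PySem.List.pyRange_one_eq_nil (by omega)]
    rfl
  | succ m ih =>
    intro i hi
    rw [PySem.List.pyRange_one_cons (by exact_mod_cast Nat.lt_of_lt_of_le (Nat.lt_succ_self i) (by omega) : (i : Int) < (W : Int))]
    show (if PySem.List.len (d.getD (i : Int) []) == 1 then ((i : Int), PySem.List.pyGet? (d.getD (i : Int) []) 0)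
      else pvAScan d (PySem.List.pyRange ((i : Int) + 1) (W : Int))) = pvBLoop bs i (m + 1)
    rw [hd i, PySem.List.len_eq]
    show _ = (if (pvBCount bs (i : Int)).1 == 1 then ((i : Int), (pvBCount bs (i : Int)).2) else pvBLoop bs (i + 1) m)
    rw [pvBCount_eq]
    by_cases hone : ((pvFilt bs i).length : Int) == 1
    · rw [if_pos hone, if_pos hone]
      rw [PySem.List.pyGet?_zero, List.head?_eq_getElem?]
    · rw [if_neg hone, if_neg hone]
      have : ((i : Int) + 1) = (((i + 1 : Nat)) : Int) := by push_cast; ring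
      rw [this]
      exact ih (i + 1) (by omega)

theorem pvHeadD (bs : List String) : PySem.List.pyGetD bs 0 "" = bs.headD "" := by
  cases bs <;> simp [PySem.List.pyGetD_zero]

-- ===== VERDICT (by name: the statement is the Claim_ definition above) =====
theorem get_button_affecting_one_counter_spec : Claim_equal_get_button_affecting_one_counter := by
  intro bs _hdom hpre
  obtain ⟨_hne, hdrop⟩ := hpre
  have hlen : PySem.Str.len (PySem.List.pyGetD bs 0 "") = (((bs.headD "").toList.length : Nat) : Int) := by
    rw [pvHeadD, PySem.Str.len_eq]
  unfold Spec_get_button_affecting_one_counter get_button_affecting_one_counter get_button_affecting_one_counter_alt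
  rw [hlen]
  rw [Int.toNat_natCast]
  show pvAScan (bs.foldl (fun d b => pvAInner b d)
      ((PySem.List.pyRange 0 (((bs.headD "").toList.length : Nat) : Int)).foldl
        (fun d ind => d.insert ind ([] : List String)) PySem.Dict.empty))
    (bs.foldl (fun d b => pvAInner b d)
      ((PySem.List.pyRange 0 (((bs.headD "").toList.length : Nat) : Int)).foldl
        (fun d ind => d.insert ind ([] : List String)) PySem.Dict.empty)).keys
    = pvBLoop bs 0 (bs.headD "").toList.length
  have hd0keys := pvD0_keys (bs.headD "").toList.length
  have hkeys : (bs.foldl (fun d b => pvAInner b d)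
      ((PySem.List.pyRange 0 (((bs.headD "").toList.length : Nat) : Int)).foldl
        (fun d ind => d.insert ind ([] : List String)) PySem.Dict.empty)).keys
      = PySem.List.pyRange 0 (((bs.headD "").toList.length : Nat) : Int) := by
    rw [pvAFold_keys bs (bs.headD "").toList.length _
      (by
        intro j hj
        rw [hd0keys, PySem.List.mem_pyRange_one]
        constructor
        · exact_mod_cast Nat.zero_le j
        · exact_mod_cast hj)
      hdrop]
    exact hd0keys
  rw [hkeys]
  exact pvScan_eq bs (bs.headD "").toList.length _
    (by
      intro k
      rw [pvAFold_getD]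
      rw [pvD0_getD _ _ _ (by simp [PySem.Dict.getD_empty])]
      simp)
    (bs.headD "").toList.length 0 (by omega)
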